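-- pv_equiv track=rewrite | github.com/eleanor-rose-t/Advent-of-Code-23 | Day5/part2.py | parse_mappings
-- ===== SOURCE A (Python) =====
-- def parse_mappings(mappings_data):
--     all_mappings = []
--     current_mapping = []
--
--     parse_mapping = False
--
--     for line in mappings_data:
--         if line.startswith("seeds:"):
--             parse_mapping = False
--             seeds = list(map(int, line.split()[1:]))
--         elif line.startswith(("seed", "soil", "fertilizer", "water", "light", "temperature", "humidity", "location")):
--             parse_mapping = True
--             if current_mapping:
--                 all_mappings.append(current_mapping)
--                 current_mapping = []
--         elif parse_mapping and line.strip():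
--             mapping = tuple(map(int, line.split()))
--             if len(mapping) == 3:
--                 current_mapping.append(mapping)
--
--     if current_mapping:
--         all_mappings.append(current_mapping)
--
--     return seeds, all_mappings
-- ===== SOURCE B (Python) =====
-- def parse_mappings(mappings_data):
--     headers = ("seed", "soil", "fertilizer", "water", "light", "temperature", "humidity", "location")
--     seed_lines = [l for l in mappings_data if l.startswith("seeds:")]
--     seeds = list(map(int, seed_lines[-1].split()[1:]))
--     all_mappings = []
--     i, n = 0, len(mappings_data)
--     while i < n:
--         line = mappings_data[i]
--         i += 1
--         if line.startswith(headers) and not line.startswith("seeds:"):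
--             block = []
--             while i < n and not mappings_data[i].startswith(headers):
--                 row = mappings_data[i]
--                 i += 1
--                 if row.strip():
--                     nums = tuple(map(int, row.split()))
--                     if len(nums) == 3:
--                         block.append(nums)
--             if block:
--                 all_mappings.append(block)
--     return seeds, all_mappings
-- ===== Notes on version B (the rewrite author's own statement) =====
-- stated objective: alternative
-- what changed: A is a single pass driven by a parse_mapping flag with a running current_mapping buffer and a final flush; B is a two-phase decomposition: seeds come from the last 'seeds:' line found by a filter, and mapping blocks are extracted by segmenting the lines at boundary (category-header) lines and parsing each segment's rows independently.
import Mathlib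
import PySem

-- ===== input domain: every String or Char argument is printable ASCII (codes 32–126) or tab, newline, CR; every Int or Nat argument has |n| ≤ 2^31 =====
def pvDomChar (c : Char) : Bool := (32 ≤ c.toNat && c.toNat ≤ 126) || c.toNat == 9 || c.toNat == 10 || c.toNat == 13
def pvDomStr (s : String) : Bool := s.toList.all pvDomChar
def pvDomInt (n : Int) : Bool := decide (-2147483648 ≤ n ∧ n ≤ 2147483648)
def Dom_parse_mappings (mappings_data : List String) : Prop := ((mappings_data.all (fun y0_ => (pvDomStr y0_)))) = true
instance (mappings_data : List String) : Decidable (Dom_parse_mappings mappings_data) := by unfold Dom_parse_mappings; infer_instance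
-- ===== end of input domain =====

-- B replaces A's one-pass flag/state machine by a two-phase decomposition (last "seeds:" line
-- via filter, mapping blocks via boundary segmentation); objective: alternative, not faster.


-- shared small helpers (the category-header tuple and int(); Pre_ excludes inputs where int() raises,
-- so the .getD 0 default is never observed inside Pre_)
def pvHeaders : List String := ["seed", "soil", "fertilizer", "water", "light", "temperature", "humidity", "location"]
def pvInt (t : String) : Int := (PySem.Int.ofStr? t).getD 0

-- ===== PORT A =====
-- loop state: (all_mappings, current_mapping, parse_mapping, seeds); seeds is Option because A's
-- `seeds` is unbound until a "seeds:" line is seen (Pre_ guarantees one, excluding the UnboundLocalError)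
def pvStepA : List (List (Int × Int × Int)) × List (Int × Int × Int) × Bool × Option (List Int) → String →
    List (List (Int × Int × Int)) × List (Int × Int × Int) × Bool × Option (List Int)
  | (allM, cur, pm, seeds), line =>
  if PySem.Str.startswith line "seeds:" then
    (allM, cur, false, some (((PySem.Str.split₀ line).drop 1).map pvInt))
  else if pvHeaders.any (fun p => PySem.Str.startswith line p) then
    ((if cur ≠ [] then allM ++ [cur] else allM), [], true, seeds)
  else if pm = true ∧ PySem.Str.strip line ≠ "" then
    match (PySem.Str.split₀ line).map pvInt with
    | [a, b, c] => (allM, cur ++ [(a, b, c)], pm, seeds)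
    | _ => (allM, cur, pm, seeds)
  else (allM, cur, pm, seeds)

def parse_mappings (mappings_data : List String) : List Int × (List (List (Int × Int × Int))) :=
  let st := mappings_data.foldl pvStepA ([], [], false, none)
  (st.2.2.2.getD [], if st.2.1 ≠ [] then st.1 ++ [st.2.1] else st.1)

-- ===== PORT B =====
def pvIsSeeds (l : String) : Bool := PySem.Str.startswith l "seeds:"
def pvIsBound (l : String) : Bool := pvHeaders.any (fun p => PySem.Str.startswith l p)
-- one data row: non-blank line whose tokens are exactly three ints
def pvRow? (l : String) : Option (Int × Int × Int) :=
  if PySem.Str.strip l ≠ "" then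
    match (PySem.Str.split₀ l).map pvInt with
    | [a, b, c] => some (a, b, c)
    | _ => none
  else none

-- the outer while-loop of B, fuel = number of remaining lines (the index loop always advances)
def pvSegsF : Nat → List String → List (List (Int × Int × Int))
  | 0, _ => []
  | _ + 1, [] => []
  | f + 1, l :: rest =>
    if pvIsBound l && !pvIsSeeds l then
      (let block := (rest.takeWhile (fun x => !pvIsBound x)).filterMap pvRow?
       if block ≠ [] then [block] else []) ++ pvSegsF f (rest.dropWhile (fun x => !pvIsBound x))
    else pvSegsF f rest

def pvSegs (xs : List String) : List (List (Int × Int × Int)) := pvSegsF xs.length xs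

def parse_mappings_alt (mappings_data : List String) : List Int × (List (List (Int × Int × Int))) :=
  let seedLines := mappings_data.filter pvIsSeeds
  let seeds : List Int :=
    match seedLines.getLast? with
    | some l => ((PySem.Str.split₀ l).drop 1).map pvInt
    | none => []  -- B's seed_lines[-1] raises IndexError here; outside Pre_ (a "seeds:" line exists inside Pre_)
  (seeds, pvSegs mappings_data)

-- ===== PRECONDITION & SPEC =====
def pvTokOk (t : String) : Bool := (PySem.Int.ofStr? t).isSome
def pvSeedsOk (l : String) : Bool := ((PySem.Str.split₀ l).drop 1).all pvTokOk
def pvRowOk (l : String) : Bool := (PySem.Str.split₀ l).all pvTokOk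
-- line i is parsed by A's `parse_mapping` branch: it is no boundary line and the nearest
-- preceding boundary line is a category header (not a "seeds:" line)
def pvActive (xs : List String) (i : Nat) : Bool :=
  !pvIsBound (xs.getD i "") &&
  (List.range i).any (fun j =>
    (pvIsBound (xs.getD j "") && !pvIsSeeds (xs.getD j "")) &&
    (List.range i).all (fun k => !(decide (j < k)) || !pvIsBound (xs.getD k "")))

-- Pre_ = exactly the inputs where A returns: some "seeds:" line exists (else UnboundLocalError),
-- every "seeds:" line and every line A parses as a mapping row has int()-parseable tokens (else ValueError)
def Pre_parse_mappings (mappings_data : List String) : Prop :=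
  (∃ l ∈ mappings_data, pvIsSeeds l = true) ∧
  (∀ l ∈ mappings_data, pvIsSeeds l = true → pvSeedsOk l = true) ∧
  (∀ i < mappings_data.length, pvActive mappings_data i = true → pvRowOk (mappings_data.getD i "") = true)
instance (mappings_data : List String) : Decidable (Pre_parse_mappings mappings_data) := by unfold Pre_parse_mappings; infer_instance

def pvWitness_parse_mappings : List String := ["seeds: 79 14", "seed-to-soil map:", "50 98 2", "", "52 50 48"]

def Spec_parse_mappings (mappings_data : List String) (out : List Int × (List (List (Int × Int × Int)))) : Prop := out = parse_mappings_alt mappings_data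
instance (mappings_data : List String) (out : List Int × (List (List (Int × Int × Int)))) : Decidable (Spec_parse_mappings mappings_data out) := by unfold Spec_parse_mappings; infer_instance


-- ===== CLAIM (what is proved, stated in full; the proofs are below) =====
def Claim_equal_parse_mappings : Prop := ∀ (mappings_data : List String), Dom_parse_mappings mappings_data → Pre_parse_mappings mappings_data → Spec_parse_mappings mappings_data (parse_mappings mappings_data)


-- ===== LEMMAS AND PROOFS =====

-- "seeds:" lines are boundary lines too (they start with "seed")
theorem pv_seeds_bound (l : String) (h : pvIsSeeds l = true) : pvIsBound l = true := by
  unfold pvIsSeeds at h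
  unfold pvIsBound pvHeaders
  simp only [PySem.Str.startswith_eq, PySem.Chars.startswith_iff] at h
  simp only [List.any_cons, List.any_nil, Bool.or_eq_true]
  refine Or.inl ?_
  simp only [PySem.Str.startswith_eq, PySem.Chars.startswith_iff]
  exact List.IsPrefix.trans (by decide) h

theorem pvSegsF_nil (f : Nat) : pvSegsF f [] = [] := by cases f <;> rfl

theorem pvSegsF_fuel (f : Nat) : ∀ (g : Nat) (xs : List String), xs.length ≤ f → xs.length ≤ g →
    pvSegsF f xs = pvSegsF g xs := by
  induction f with
  | zero =>
    intro g xs hf _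
    have : xs = [] := List.eq_nil_of_length_eq_zero (Nat.le_zero.mp hf)
    subst this
    simp [pvSegsF_nil]
  | succ f ih =>
    intro g xs hf hg
    cases xs with
    | nil => simp [pvSegsF_nil]
    | cons l rest =>
      cases g with
      | zero => simp at hg
      | succ g =>
        simp only [List.length_cons, Nat.succ_le_succ_iff] at hf hg
        rw [pvSegsF, pvSegsF]
        by_cases h : (pvIsBound l && !pvIsSeeds l) = true
        · simp only [h, if_true]
          have hd := List.length_dropWhile_le (fun x => !pvIsBound x) rest
          rw [ih g (rest.dropWhile fun x => !pvIsBound x) (le_trans hd hf) (le_trans hd hg)]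
        · simp only [h]
          exact ih g rest hf hg

-- the two block shapes B's scan produces, phrased over A's loop state
def pvPend (c : List (Int × Int × Int)) (xs : List String) : List (List (Int × Int × Int)) :=
  (if c ≠ [] then [c] else []) ++ pvSegs xs

def pvFrom (c : List (Int × Int × Int)) (xs : List String) : List (List (Int × Int × Int)) :=
  (let blk := c ++ (xs.takeWhile (fun x => !pvIsBound x)).filterMap pvRow?
   if blk ≠ [] then [blk] else []) ++ pvSegs (xs.dropWhile (fun x => !pvIsBound x))

theorem pvSegs_cons_other (l : String) (xs : List String) (h : (pvIsBound l && !pvIsSeeds l) = false) :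
    pvSegs (l :: xs) = pvSegs xs := by
  unfold pvSegs
  rw [show (l :: xs).length = xs.length + 1 from rfl, pvSegsF, h]
  simp

theorem pvSegs_cons_header (l : String) (xs : List String) (h : (pvIsBound l && !pvIsSeeds l) = true) :
    pvSegs (l :: xs) = pvFrom [] xs := by
  unfold pvSegs pvFrom
  rw [show (l :: xs).length = xs.length + 1 from rfl, pvSegsF, h]
  simp only [if_true, List.nil_append]
  rw [pvSegsF_fuel xs.length ((xs.dropWhile fun x => !pvIsBound x).length)
      (xs.dropWhile fun x => !pvIsBound x) (List.length_dropWhile_le _ _) le_rfl]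
  rfl

theorem pvFrom_cons_bound (l : String) (xs : List String) (c : List (Int × Int × Int))
    (h : pvIsBound l = true) :
    pvFrom c (l :: xs) = (if c ≠ [] then [c] else []) ++ pvSegs (l :: xs) := by
  unfold pvFrom
  rw [List.takeWhile_cons, List.dropWhile_cons]
  simp [h]

theorem pvFrom_cons_row (l : String) (xs : List String) (c : List (Int × Int × Int))
    (h : pvIsBound l = false) :
    pvFrom c (l :: xs) = pvFrom (c ++ (pvRow? l).toList) xs := by
  unfold pvFrom
  rw [List.takeWhile_cons, List.dropWhile_cons]
  cases hr : pvRow? l with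
  | none => simp [h, hr]
  | some t => simp [h, hr]

def pvSeedsOut (xs : List String) (s : Option (List Int)) : List Int :=
  match (xs.filter pvIsSeeds).getLast? with
  | some l => ((PySem.Str.split₀ l).drop 1).map pvInt
  | none => s.getD []

theorem pvSeedsOut_cons_seeds (l : String) (xs : List String) (s : Option (List Int))
    (hs : pvIsSeeds l = true) :
    pvSeedsOut (l :: xs) s = pvSeedsOut xs (some (((PySem.Str.split₀ l).drop 1).map pvInt)) := by
  unfold pvSeedsOut
  rw [List.filter_cons_of_pos hs]
  cases h : xs.filter pvIsSeeds with
  | nil => simp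
  | cons y ys =>
    rcases e : (y :: ys).getLast? with _ | z
    · exact absurd (List.getLast?_eq_none_iff.mp e) (by simp)
    · rw [List.getLast?_cons_cons, e]

theorem pvSeedsOut_cons_other (l : String) (xs : List String) (s : Option (List Int))
    (hs : pvIsSeeds l = false) : pvSeedsOut (l :: xs) s = pvSeedsOut xs s := by
  unfold pvSeedsOut
  rw [List.filter_cons_of_neg (by simp [hs])]

-- the four shapes of one step of A's loop
theorem pvStepA_seeds (b : List (List (Int × Int × Int))) (c : List (Int × Int × Int)) (pm : Bool)
    (s : Option (List Int)) (l : String) (hs : pvIsSeeds l = true) :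
    pvStepA (b, c, pm, s) l = (b, c, false, some (((PySem.Str.split₀ l).drop 1).map pvInt)) := by
  simp only [pvStepA]
  unfold pvIsSeeds at hs
  rw [if_pos hs]

theorem pvStepA_header (b : List (List (Int × Int × Int))) (c : List (Int × Int × Int)) (pm : Bool)
    (s : Option (List Int)) (l : String) (hs : pvIsSeeds l = false) (hb : pvIsBound l = true) :
    pvStepA (b, c, pm, s) l = ((if c ≠ [] then b ++ [c] else b), [], true, s) := by
  simp only [pvStepA]
  unfold pvIsSeeds at hs
  unfold pvIsBound at hb
  rw [if_neg (by rw [hs]; simp), if_pos hb]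

theorem pvStepA_skip (b : List (List (Int × Int × Int))) (c : List (Int × Int × Int))
    (s : Option (List Int)) (l : String) (hs : pvIsSeeds l = false) (hb : pvIsBound l = false) :
    pvStepA (b, c, false, s) l = (b, c, false, s) := by
  simp only [pvStepA]
  unfold pvIsSeeds at hs
  unfold pvIsBound at hb
  rw [if_neg (by rw [hs]; simp), if_neg (by rw [hb]; simp), if_neg (by simp)]

theorem pvStepA_row (b : List (List (Int × Int × Int))) (c : List (Int × Int × Int))
    (s : Option (List Int)) (l : String) (hs : pvIsSeeds l = false) (hb : pvIsBound l = false) :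
    pvStepA (b, c, true, s) l = (b, c ++ (pvRow? l).toList, true, s) := by
  simp only [pvStepA]
  unfold pvRow?
  unfold pvIsSeeds at hs
  unfold pvIsBound at hb
  rw [if_neg (by rw [hs]; simp), if_neg (by rw [hb]; simp)]
  by_cases hst : PySem.Str.strip l = ""
  · rw [if_neg (by simp [hst]), if_neg (by simp [hst])]
    simp
  · rw [if_pos (by simp [hst]), if_pos hst]
    cases hm : (PySem.Str.split₀ l).map pvInt with
    | nil => simp
    | cons a t =>
      cases t with
      | nil => simp
      | cons a2 t2 =>
        cases t2 with
        | nil => simp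
        | cons a3 t3 =>
          cases t3 with
          | nil => simp
          | cons a4 t4 => simp

-- MAIN INVARIANT: A's fold, finished the way A finishes it, equals B's decomposition
theorem pv_fold : ∀ (xs : List String) (b : List (List (Int × Int × Int)))
    (c : List (Int × Int × Int)) (pm : Bool) (s : Option (List Int)),
    (((xs.foldl pvStepA (b, c, pm, s)).2.2.2.getD [] : List Int),
      (if (xs.foldl pvStepA (b, c, pm, s)).2.1 ≠ []
       then (xs.foldl pvStepA (b, c, pm, s)).1 ++ [(xs.foldl pvStepA (b, c, pm, s)).2.1]
       else (xs.foldl pvStepA (b, c, pm, s)).1))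
    = (pvSeedsOut xs s, b ++ (if pm then pvFrom c xs else pvPend c xs)) := by
  intro xs
  induction xs with
  | nil =>
    intro b c pm s
    simp only [List.foldl_nil, pvSeedsOut, pvPend, pvFrom, pvSegs, pvSegsF_nil]
    cases pm <;> by_cases hc : c = [] <;> simp [hc, pvSegsF_nil]
  | cons l xs ih =>
    intro b c pm s
    simp only [List.foldl_cons]
    by_cases hs : pvIsSeeds l = true
    · rw [pvStepA_seeds b c pm s l hs, ih, pvSeedsOut_cons_seeds l xs s hs]
      have hb := pv_seeds_bound l hs
      have hsegs : pvSegs (l :: xs) = pvSegs xs := pvSegs_cons_other l xs (by simp [hs])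
      cases pm
      · simp only [Bool.false_eq_true, if_false]
        unfold pvPend
        rw [hsegs]
      · simp only [if_true, Bool.false_eq_true, if_false]
        unfold pvPend
        rw [pvFrom_cons_bound l xs c hb, hsegs]
    · replace hs : pvIsSeeds l = false := by simpa using hs
      by_cases hb : pvIsBound l = true
      · rw [pvStepA_header b c pm s l hs hb, ih, pvSeedsOut_cons_other l xs s hs]
        have hside : pvSegs (l :: xs) = pvFrom [] xs :=
          pvSegs_cons_header l xs (by simp [hb, hs])
        cases pm
        · simp only [Bool.false_eq_true, if_false]
          unfold pvPend
          rw [hside]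
          by_cases hc : c = [] <;> simp [hc]
        · simp only [if_true]
          rw [pvFrom_cons_bound l xs c hb, hside]
          by_cases hc : c = [] <;> simp [hc]
      · replace hb : pvIsBound l = false := by simpa using hb
        have hsegs : pvSegs (l :: xs) = pvSegs xs := pvSegs_cons_other l xs (by simp [hb])
        cases pm
        · rw [pvStepA_skip b c s l hs hb, ih, pvSeedsOut_cons_other l xs s hs]
          simp only [Bool.false_eq_true, if_false]
          unfold pvPend
          rw [hsegs]
        · rw [pvStepA_row b c s l hs hb, ih, pvSeedsOut_cons_other l xs s hs]
          simp only [if_true]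
          rw [pvFrom_cons_row l xs c hb]

theorem parse_mappings_alt_eq (d : List String) :
    parse_mappings_alt d = (pvSeedsOut d none, pvSegs d) := by
  unfold parse_mappings_alt pvSeedsOut
  cases h : (d.filter pvIsSeeds).getLast? <;> simp [h]

-- ===== VERDICT (by name: the statement is the Claim_ definition above) =====
theorem parse_mappings_spec : Claim_equal_parse_mappings := by
  intro d _ _
  unfold Spec_parse_mappings parse_mappings
  rw [parse_mappings_alt_eq]
  have h := pv_fold d [] [] false none
  simp only [Bool.false_eq_true, if_false, pvPend, ne_eq, not_true_eq_false, List.nil_append] at h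
  exact h
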